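-- pv_equiv track=rewrite | github.com/pyjune/SSA2 | 0815/문자열비교.py | f
-- ===== SOURCE A (Python) =====
-- def f(s1, s2):
--     i = 0 # 비교할 글자의 인덱스
--     while(i<len(s1) and i<len(s2)): # 어느 문자열의 끝이 아니고
--         if s1[i] == s2[i]:
--             i = i + 1
--         else:
--             break
--     if i==len(s1) and i==len(s2): # 마지막 글자까지 같고 동시에 종료(글자수 같음)
--         return 1
--     else:
--         return 0
-- ===== SOURCE B (Python) =====
-- def f(s1, s2):
--     return 1 if s1 == s2 else 0
-- ===== Notes on version B (the rewrite author's own statement) =====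
-- stated objective: idiomatic
-- what changed: Replaced the manual index loop with early break plus a final length-matching check by a single closed-form built-in equality expression returning int.
import Mathlib
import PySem

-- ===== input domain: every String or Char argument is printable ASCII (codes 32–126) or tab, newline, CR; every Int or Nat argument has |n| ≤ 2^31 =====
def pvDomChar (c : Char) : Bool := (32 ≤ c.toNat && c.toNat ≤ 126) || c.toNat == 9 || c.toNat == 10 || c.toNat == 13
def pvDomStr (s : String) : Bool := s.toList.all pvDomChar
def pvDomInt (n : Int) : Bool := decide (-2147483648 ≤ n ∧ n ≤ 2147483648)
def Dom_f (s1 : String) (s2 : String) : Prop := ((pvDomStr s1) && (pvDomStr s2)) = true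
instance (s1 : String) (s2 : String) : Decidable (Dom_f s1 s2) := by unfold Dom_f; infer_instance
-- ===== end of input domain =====

-- B replaces A's manual index loop + final length check by the built-in string equality (idiomatic).


-- ===== PORT A =====
-- A's while loop: advance i while both indices are in range and the chars match
def fLoop (l1 l2 : List Char) (i : Nat) : Nat :=
  if h : i < l1.length ∧ i < l2.length then
    if l1[i]'h.1 = l2[i]'h.2 then fLoop l1 l2 (i + 1) else i
  else i
termination_by l1.length - i

def f (s1 : String) (s2 : String) : Int :=
  let l1 := s1.toList
  let l2 := s2.toList
  let i := fLoop l1 l2 0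
  if i = l1.length ∧ i = l2.length then 1 else 0

-- ===== PORT B =====
def f_alt (s1 : String) (s2 : String) : Int := if s1 == s2 then 1 else 0

-- ===== PRECONDITION & SPEC =====
def Spec_f (s1 : String) (s2 : String) (out : Int) : Prop := out = f_alt s1 s2
instance (s1 : String) (s2 : String) (out : Int) : Decidable (Spec_f s1 s2 out) := by unfold Spec_f; infer_instance

-- ===== CLAIM (what is proved, stated in full; the proofs are below) =====
def Claim_equal_f : Prop := ∀ (s1 : String) (s2 : String), Dom_f s1 s2 → Spec_f s1 s2 (f s1 s2)

-- ===== LEMMAS AND PROOFS =====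
theorem fLoop_shift (a b : Char) (t1 t2 : List Char) (i : Nat) :
    fLoop (a :: t1) (b :: t2) (i + 1) = fLoop t1 t2 i + 1 := by
  fun_induction fLoop t1 t2 i with
  | case1 i h heq ih =>
      rw [fLoop]
      simp only [List.length_cons]
      rw [dif_pos ⟨by omega, by omega⟩]
      simpa [heq] using ih
  | case2 i h heq =>
      rw [fLoop]
      simp only [List.length_cons]
      rw [dif_pos ⟨by omega, by omega⟩]
      simp [heq]
  | case3 i h =>
      rw [fLoop]
      simp only [List.length_cons]
      rw [dif_neg (by omega)]

theorem fLoop_key (l1 : List Char) : ∀ l2 : List Char,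
    (fLoop l1 l2 0 = l1.length ∧ fLoop l1 l2 0 = l2.length) ↔ l1 = l2 := by
  induction l1 with
  | nil =>
      intro l2
      cases l2 with
      | nil => simp [fLoop]
      | cons b t2 =>
          rw [fLoop, dif_neg (by simp)]
          simp
  | cons a t1 ih =>
      intro l2
      cases l2 with
      | nil =>
          rw [fLoop, dif_neg (by simp)]
          simp
      | cons b t2 =>
          rw [fLoop, dif_pos (by simp)]
          by_cases hab : a = b
          · simp only [List.getElem_cons_zero, if_pos hab, fLoop_shift]
            have := ih t2
            constructor
            · rintro ⟨h1, h2⟩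
              simp only [List.length_cons] at h1 h2
              have : t1 = t2 := (ih t2).mp ⟨by omega, by omega⟩
              simp [hab, this]
            · rintro h
              injection h with h1 h2
              have := ((ih t2).mpr h2)
              simp only [List.length_cons]
              omega
          · simp only [List.getElem_cons_zero, if_neg hab]
            constructor
            · rintro ⟨h1, _⟩; simp at h1
            · intro h; injection h with h1 _; exact absurd h1 hab

-- ===== VERDICT (by name: the statement is the Claim_ definition above) =====
theorem f_spec : Claim_equal_f := by
  intro s1 s2 _
  unfold Spec_f f f_alt
  by_cases h : s1 = s2
  · subst h
    simp [(fLoop_key s1.toList s1.toList).mpr rfl]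
  · have hl : s1.toList ≠ s2.toList := fun he => h (String.toList_injective he)
    rw [if_neg (fun hc => hl ((fLoop_key _ _).mp hc))]
    simp [h]
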